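-- pv_equiv track=rewrite | github.com/parichit/dipy | dipy/workflows/vis_registeration.py | get_row_cols
-- ===== SOURCE A (Python) =====
-- def get_row_cols(num_slices):
--
--     """
--     Experimetal helper function to get the number
--     of rows and columns for the mosaic.
--
--     num_slices: int
--         The number of slices as obtained from the
--         create_mosaic function.
--     return: the number of rows and columns.
--     """
--     rows, cols = 0, 0
--
--     while True:
--         if num_slices % 5 == 0:
--             break
--         num_slices += 1
--
--     for i in range(5, num_slices):
--
--         if num_slices % i == 0:
--             rows = i
--             cols = num_slices // i
--             break
--
--     return rows, cols
-- ===== SOURCE B (Python) =====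
-- def get_row_cols(num_slices):
--     # closed form: round up to the next multiple of 5; any m > 5 that is a
--     # multiple of 5 has 5 as its smallest factor >= 5, so rows = 5, cols = m // 5
--     m = ((num_slices + 4) // 5) * 5
--     if m <= 5:
--         return 0, 0
--     return 5, m // 5
-- ===== Notes on version B (the rewrite author's own statement) =====
-- stated objective: simpler
-- what changed: Both loops are replaced by closed-form arithmetic: m = ((num_slices+4)//5)*5 rounds up to the next multiple of 5, and since A's divisor scan starting at 5 always succeeds immediately whenever its range is nonempty, the answer is (0,0) for an empty range and (5, m//5) otherwise.
import Mathlib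
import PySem

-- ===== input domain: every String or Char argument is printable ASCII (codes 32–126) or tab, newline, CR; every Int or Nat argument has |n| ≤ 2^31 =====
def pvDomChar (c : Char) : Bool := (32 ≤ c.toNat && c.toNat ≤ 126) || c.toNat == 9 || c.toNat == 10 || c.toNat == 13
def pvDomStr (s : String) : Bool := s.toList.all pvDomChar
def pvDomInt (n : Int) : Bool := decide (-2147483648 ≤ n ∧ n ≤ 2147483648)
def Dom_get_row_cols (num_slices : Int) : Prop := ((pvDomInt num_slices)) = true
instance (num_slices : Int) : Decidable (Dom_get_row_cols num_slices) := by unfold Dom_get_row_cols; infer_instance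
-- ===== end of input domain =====

-- B replaces A's two loops by a closed form (round up to the next multiple of 5, then (5, m//5) unless the scan range is empty); objective: simpler/faster.

-- ===== PORT A =====
-- the 'while True: if num_slices % 5 == 0: break; num_slices += 1' loop;
-- the Nat counter is a totality guard only: at most 4 increments are ever needed
def pvRound5Go : Nat → Int → Int
  | 0, n => n
  | Nat.succ k, n => if PySem.Int.mod n 5 = 0 then n else pvRound5Go k (n + 1)

def pvRound5 (n : Int) : Int := pvRound5Go 4 n

-- the 'for i in range(5, num_slices): if num_slices % i == 0: …; break' loop
def pvScan (m : Int) : List Int → Int × Int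
  | [] => (0, 0)
  | i :: rest =>
      if PySem.Int.mod m i = 0 then (i, PySem.Int.floordiv m i) else pvScan m rest

def get_row_cols (num_slices : Int) : Int × Int :=
  let m := pvRound5 num_slices
  pvScan m (PySem.List.pyRange 5 m 1)

-- ===== PORT B =====
def get_row_cols_alt (num_slices : Int) : Int × Int :=
  let m := (PySem.Int.floordiv (num_slices + 4) 5) * 5
  if m ≤ 5 then (0, 0) else (5, PySem.Int.floordiv m 5)

-- ===== PRECONDITION & SPEC =====
def Spec_get_row_cols (num_slices : Int) (out : Int × Int) : Prop := out = get_row_cols_alt num_slices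
instance (num_slices : Int) (out : Int × Int) : Decidable (Spec_get_row_cols num_slices out) := by unfold Spec_get_row_cols; infer_instance

-- ===== CLAIM (what is proved, stated in full; the proofs are below) =====
def Claim_equal_get_row_cols : Prop := ∀ (num_slices : Int), Dom_get_row_cols num_slices → Spec_get_row_cols num_slices (get_row_cols num_slices)

-- ===== LEMMAS AND PROOFS =====

-- A's while loop computes the round-up to the next multiple of 5
theorem pvRound5_eq (n : Int) : pvRound5 n = ((n + 4) / 5) * 5 := by
  unfold pvRound5
  simp only [pvRound5Go, PySem.Int.mod_eq_emod_of_pos (by omega : (0:Int) < 5)]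
  split_ifs <;> omega

-- ===== VERDICT (by name: the statement is the Claim_ definition above) =====
theorem get_row_cols_spec : Claim_equal_get_row_cols := by
  unfold Claim_equal_get_row_cols
  intro n _
  unfold Spec_get_row_cols get_row_cols get_row_cols_alt
  rw [pvRound5_eq,
    PySem.Int.floordiv_eq_ediv_of_pos (by omega : (0:Int) < 5) (a := n + 4)]
  set m : Int := ((n + 4) / 5) * 5 with hm
  have hmod : m % 5 = 0 := by omega
  show pvScan m (PySem.List.pyRange 5 m 1) = if m ≤ 5 then (0, 0) else (5, PySem.Int.floordiv m 5)
  by_cases h5 : m ≤ 5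
  · rw [PySem.List.pyRange_one_eq_nil (by omega : m ≤ 5)]
    simp [pvScan, h5]
  · rw [PySem.List.pyRange_one_cons (by omega : (5:Int) < m)]
    have h0 : PySem.Int.mod m 5 = 0 := by
      rw [PySem.Int.mod_eq_emod_of_pos (by omega : (0:Int) < 5)]; exact hmod
    rw [pvScan, if_pos h0, if_neg h5]
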